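-- pv_equiv track=rewrite | github.com/aniketmondal1210/LeetCode-Odyssey | 3707. Equal Score Substrings/equal_score_substrings.py | scoreBalance
-- ===== SOURCE A (Python) =====
-- def scoreBalance(s: str) -> bool:
--     for i in range(1, len(s)):
--         left = s[:i]
--         right = s[i:]
--
--         left_sum = sum(ord(ch) - ord('a') + 1 for ch in left)
--         right_sum = sum(ord(ch) - ord('a') + 1 for ch in right)
--
--         if left_sum == right_sum:
--             return True
--     return False
-- ===== SOURCE B (Python) =====
-- def scoreBalance(s: str) -> bool:
--     total = sum(ord(ch) - ord('a') + 1 for ch in s)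
--     prefix = 0
--     for ch in s[:-1]:
--         prefix += ord(ch) - ord('a') + 1
--         if 2 * prefix == total:
--             return True
--     return False
-- ===== Notes on version B (the rewrite author's own statement) =====
-- stated objective: faster
-- what changed: Replaced the per-split recomputation of both halves' sums with a single total computed once and a running prefix sum compared as 2*prefix == total in one pass.
import Mathlib
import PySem

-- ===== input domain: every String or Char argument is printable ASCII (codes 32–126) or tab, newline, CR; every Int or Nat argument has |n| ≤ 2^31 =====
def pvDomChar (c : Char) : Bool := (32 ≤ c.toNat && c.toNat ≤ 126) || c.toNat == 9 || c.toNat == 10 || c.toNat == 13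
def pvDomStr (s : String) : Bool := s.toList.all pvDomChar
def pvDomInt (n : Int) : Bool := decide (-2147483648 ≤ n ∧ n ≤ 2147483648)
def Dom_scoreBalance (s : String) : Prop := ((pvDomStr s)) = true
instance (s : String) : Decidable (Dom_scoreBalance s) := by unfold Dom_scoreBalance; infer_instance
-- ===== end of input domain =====

-- B replaces A's per-split recomputation of both halves (O(n^2)) by one total plus a
-- running prefix sum compared as 2*prefix == total in a single pass (O(n)).

-- ===== PORT A =====
-- ord(ch) - ord('a') + 1
def pvScore (c : Char) : Int := (c.toNat : Int) - ('a'.toNat : Int) + 1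

-- the 'for i in range(1, len(s))' loop with early return
def pvALoop (cs : List Char) : List Int → Bool
  | [] => false
  | i :: rest =>
      let left := PySem.List.slice cs none (some i)
      let right := PySem.List.slice cs (some i) none
      let leftSum := (left.map pvScore).sum
      let rightSum := (right.map pvScore).sum
      if leftSum = rightSum then true else pvALoop cs rest

def scoreBalance (s : String) : Bool :=
  pvALoop s.toList (PySem.List.pyRange 1 (PySem.Str.len s) 1)

-- ===== PORT B =====
-- the 'for ch in s[:-1]' loop with running prefix and early return
def pvBLoop (total : Int) : Int → List Char → Bool
  | _, [] => false
  | pre, c :: rest =>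
      let p := pre + pvScore c
      if 2 * p = total then true else pvBLoop total p rest

def scoreBalance_alt (s : String) : Bool :=
  let cs := s.toList
  let total := (cs.map pvScore).sum
  pvBLoop total 0 (PySem.List.slice cs none (some (-1)))

-- ===== PRECONDITION & SPEC =====
def Spec_scoreBalance (s : String) (out : Bool) : Prop := out = scoreBalance_alt s
instance (s : String) (out : Bool) : Decidable (Spec_scoreBalance s out) := by unfold Spec_scoreBalance; infer_instance

-- ===== CLAIM (what is proved, stated in full; the proofs are below) =====
def Claim_equal_scoreBalance : Prop := ∀ (s : String), Dom_scoreBalance s → Spec_scoreBalance s (scoreBalance s)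

-- ===== LEMMAS AND PROOFS =====

-- A's early-return loop is an 'any' over the index list
theorem pvALoop_eq_any (cs : List Char) (idxs : List Int) :
    pvALoop cs idxs = idxs.any (fun i =>
      decide (((PySem.List.slice cs none (some i)).map pvScore).sum
            = ((PySem.List.slice cs (some i) none).map pvScore).sum)) := by
  induction idxs with
  | nil => rfl
  | cons i rest ih =>
      simp only [pvALoop, List.any_cons, ih]
      split_ifs with h <;> simp [h]

-- B's early-return loop is an 'any' over prefix lengths
theorem pvBLoop_eq_any (l : List Char) (total : Int) : ∀ (p : Int),
    pvBLoop total p l = (List.range l.length).any (fun j =>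
      decide (2 * (p + ((l.take (j+1)).map pvScore).sum) = total)) := by
  induction l with
  | nil => intro p; rfl
  | cons c rest ih =>
      intro p
      simp only [pvBLoop, List.length_cons, List.range_succ_eq_map, List.any_cons,
        List.any_map, ih (p + pvScore c)]
      split_ifs with h
      · simp only [List.take_succ_cons, List.take_zero, List.map_cons, List.map_nil,
          List.sum_cons, List.sum_nil, add_zero] at *
        simp [h]
      · simp only [List.take_succ_cons, List.take_zero, List.map_cons, List.map_nil,
          List.sum_cons, List.sum_nil, add_zero]
        have : ¬ (2 * (p + pvScore c) = total) := h
        simp only [Function.comp_def]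
        rw [show (decide (2 * (p + pvScore c) = total)) = false by simp [this]]
        simp only [Bool.false_or]
        apply PySem.List.any_congr_mem  -- pointwise equal bodies
        intro j _
        simp only [Nat.succ_eq_add_one, decide_eq_decide]
        constructor <;> intro h2 <;> linarith

-- splitting the score sum at a take/drop boundary
theorem pvSum_split (cs : List Char) (k : Nat) :
    ((cs.take k).map pvScore).sum + ((cs.drop k).map pvScore).sum = (cs.map pvScore).sum := by
  conv_rhs => rw [← List.take_append_drop k cs]
  simp

theorem scoreBalance_spec : Claim_equal_scoreBalance := by
  intro s _
  unfold Spec_scoreBalance scoreBalance scoreBalance_alt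
  set cs := s.toList with hcs
  have hlen : PySem.Str.len s = (cs.length : Int) := by
    simp [PySem.Str.len_eq, hcs]
  rw [hlen, pvALoop_eq_any, pvBLoop_eq_any,
      PySem.List.slice_to_neg_one, PySem.List.pyRange_one, List.any_map]
  rw [List.length_dropLast]
  have hto : ((cs.length : Int) - 1).toNat = cs.length - 1 := by omega
  rw [hto]
  apply PySem.List.any_congr_mem
  intro k hk
  have hk' : k < cs.length - 1 := List.mem_range.mp hk
  have h1 : (0:Int) ≤ 1 + (k:Int) := by omega
  simp only [Function.comp_def]
  rw [PySem.List.slice_to _ h1, PySem.List.slice_from _ h1]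
  have htn : ((1:Int) + (k:Int)).toNat = k + 1 := by omega
  rw [htn]
  have htake : cs.dropLast.take (k+1) = cs.take (k+1) := by
    rw [List.dropLast_eq_take, List.take_take]
    congr 1
    omega
  rw [htake]
  have hsplit := pvSum_split cs (k+1)
  rw [decide_eq_decide]
  constructor <;> intro h2 <;> linarith
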